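-- pv_equiv track=rewrite | github.com/daniel-reich/ubiquitous-fiesta | HSKvp4qYA2AhDWxn6_6.py | total_points
-- ===== SOURCE A (Python) =====
-- def total_points(guesses, word):
--   point = 0
--   for guess in guesses:
--     word_list = list(word)
--     c = 0
--     for w in guess:
--       if w in word_list:
--         word_list.remove(w)
--         c += 1
--       else:
--         c = 0
--         break
--     if c == 3: point += 1
--     elif c == 4: point += 2
--     elif c == 5: point += 3
--     elif c == 6: point += 54
--   return point
-- ===== SOURCE B (Python) =====
-- def total_points(guesses, word):
--     pts = {3: 1, 4: 2, 5: 3, 6: 54}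
--     wl = list(word)
--     total = 0
--     for g in guesses:
--         gl = list(g)
--         if all(gl.count(ch) <= wl.count(ch) for ch in gl):
--             total += pts.get(len(gl), 0)
--     return total
-- ===== Notes on version B (the rewrite author's own statement) =====
-- stated objective: alternative
-- what changed: B decides multiset containment by comparing per-character counts against the word (no mutable copy, no remove loop) and scores the guess length through a points table, instead of A's destructive scan that removes matched letters one by one and an if/elif chain on the matched count.
import Mathlib
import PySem

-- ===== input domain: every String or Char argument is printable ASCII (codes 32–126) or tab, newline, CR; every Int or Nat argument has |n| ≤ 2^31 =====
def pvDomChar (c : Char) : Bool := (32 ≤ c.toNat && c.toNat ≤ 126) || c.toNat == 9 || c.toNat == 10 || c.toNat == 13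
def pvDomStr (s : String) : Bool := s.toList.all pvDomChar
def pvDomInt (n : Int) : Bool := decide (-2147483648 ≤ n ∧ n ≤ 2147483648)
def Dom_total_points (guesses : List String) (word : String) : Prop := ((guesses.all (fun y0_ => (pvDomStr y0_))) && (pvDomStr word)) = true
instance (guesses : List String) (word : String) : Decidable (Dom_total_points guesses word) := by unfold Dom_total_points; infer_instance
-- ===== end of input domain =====

-- B replaces A's destructive scan (membership test + list.remove on a mutable copy of the
-- word, then an if/elif chain on the matched count) by a per-character count comparison
-- deciding multiset containment plus a points table keyed by the guess length (objective:
-- alternative decomposition, similar cost).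

-- ===== PORT A =====
-- inner 'for w in guess' loop: word_list.remove(w) is guarded by 'w in word_list',
-- so remove? is always 'some' here; getD only discharges the Option.
def pvAInner (guess : List Char) (wl : List Char) (c : Nat) : Nat :=
  match guess with
  | [] => c
  | w :: ws =>
      if wl.contains w then pvAInner ws ((PySem.List.remove? wl w).getD wl) (c + 1)
      else 0

def total_points (guesses : List String) (word : String) : Int :=
  guesses.foldl (fun point guess =>
    let c := pvAInner guess.toList word.toList 0
    if c = 3 then point + 1
    else if c = 4 then point + 2
    else if c = 5 then point + 3
    else if c = 6 then point + 54
    else point) 0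

-- ===== PORT B =====
-- pts = {3: 1, 4: 2, 5: 3, 6: 54}
def pvPts : PySem.Dict Int Int := ⟨[(3, 1), (4, 2), (5, 3), (6, 54)]⟩

-- all(gl.count(ch) <= wl.count(ch) for ch in gl)
def pvBCheck (gl : List Char) (wl : List Char) : Bool :=
  gl.all (fun ch => decide (PySem.List.count gl ch ≤ PySem.List.count wl ch))

def total_points_alt (guesses : List String) (word : String) : Int :=
  let wl := word.toList
  guesses.foldl (fun total g =>
    let gl := g.toList
    if pvBCheck gl wl then total + PySem.Dict.getD pvPts (gl.length : Int) 0
    else total) 0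

-- ===== PRECONDITION & SPEC =====
def Spec_total_points (guesses : List String) (word : String) (out : Int) : Prop := out = total_points_alt guesses word
instance (guesses : List String) (word : String) (out : Int) : Decidable (Spec_total_points guesses word out) := by unfold Spec_total_points; infer_instance

-- ===== CLAIM (what is proved, stated in full; the proofs are below) =====
def Claim_equal_total_points : Prop := ∀ (guesses : List String) (word : String), Dom_total_points guesses word → Spec_total_points guesses word (total_points guesses word)

-- ===== LEMMAS AND PROOFS =====

-- B's Bool check ↔ counts bounded for ALL characters
theorem pvBCheck_iff (gl wl : List Char) :
    pvBCheck gl wl = true ↔ ∀ ch : Char, gl.count ch ≤ wl.count ch := by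
  simp only [pvBCheck, PySem.List.count_eq, List.all_eq_true, decide_eq_true_eq]
  constructor
  · intro h ch
    by_cases hch : ch ∈ gl
    · exact h ch hch
    · simp [List.count_eq_zero_of_not_mem hch]
  · intro h ch _
    exact h ch

-- multiset-containment step: pulling one character through erase
theorem pvCheck_cons (w : Char) (ws wl : List Char) :
    (∀ ch : Char, (w :: ws).count ch ≤ wl.count ch) ↔
      (w ∈ wl ∧ ∀ ch : Char, ws.count ch ≤ (wl.erase w).count ch) := by
  constructor
  · intro h
    have hw : w ∈ wl := by
      have := h w
      simp [List.count_cons_self] at this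
      exact List.count_pos_iff.mp (by omega)
    refine ⟨hw, fun ch => ?_⟩
    by_cases hcw : ch = w
    · subst hcw
      have := h ch
      rw [List.count_cons_self] at this
      rw [List.count_erase_self]
      omega
    · have := h ch
      have hwc : ¬ w = ch := fun hh => hcw hh.symm
      rw [List.count_erase_of_ne hcw]
      simp only [List.count_cons, beq_iff_eq, hwc, if_false] at this ⊢
      omega
  · rintro ⟨hw, h⟩ ch
    by_cases hcw : ch = w
    · subst hcw
      have hpos : 0 < wl.count ch := List.count_pos_iff.mpr hw
      have := h ch
      rw [List.count_erase_self] at this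
      rw [List.count_cons_self]
      omega
    · have := h ch
      have hwc : ¬ w = ch := fun hh => hcw hh.symm
      rw [List.count_erase_of_ne hcw] at this
      simp only [List.count_cons, beq_iff_eq, hwc, if_false]
      omega

-- characterisation of A's inner loop
theorem pvAInner_eq (gl : List Char) : ∀ (wl : List Char) (c : Nat),
    pvAInner gl wl c = if pvBCheck gl wl then c + gl.length else 0 := by
  induction gl with
  | nil => intro wl c; simp [pvAInner, pvBCheck]
  | cons w ws ih =>
    intro wl c
    by_cases hw : w ∈ wl
    · have hrem : PySem.List.remove? wl w = some (wl.erase w) :=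
        PySem.List.remove?_eq_some_erase wl w hw
      rw [pvAInner]
      rw [if_pos (by simpa using hw), hrem]
      simp only [Option.getD_some]
      rw [ih (wl.erase w) (c + 1)]
      have hiff : pvBCheck (w :: ws) wl = pvBCheck ws (wl.erase w) :=
        Bool.eq_iff_iff.mpr ((pvBCheck_iff _ _).trans
          ((pvCheck_cons w ws wl).trans ((and_iff_right hw).trans (pvBCheck_iff _ _).symm)))
      rw [hiff]
      split
      · simp [List.length_cons]; omega
      · rfl
    · rw [pvAInner, if_neg (by simpa using hw)]
      have hfalse : pvBCheck (w :: ws) wl = false :=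
        Bool.eq_false_iff.mpr
          (fun h1 => hw ((pvCheck_cons w ws wl).mp ((pvBCheck_iff _ _).mp h1)).1)
      rw [hfalse]
      simp

-- the points table, evaluated
theorem pvPts_getD (n : Nat) :
    PySem.Dict.getD pvPts (n : Int) 0 =
      (if n = 3 then 1 else if n = 4 then 2 else if n = 5 then 3
       else if n = 6 then 54 else 0) := by
  have h3 : ¬ (n = 3) → ((3:Int) = (n:Int)) → False := by intro h he; omega
  rcases Nat.lt_or_ge n 7 with h | h
  · interval_cases n <;> rfl
  · have : PySem.Dict.getD pvPts (n : Int) 0 = 0 := by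
      simp only [pvPts, PySem.Dict.getD_eq_get?_getD]
      rw [PySem.Dict.get?_mk_cons, PySem.Dict.get?_mk_cons,
          PySem.Dict.get?_mk_cons, PySem.Dict.get?_mk_cons]
      have e3 : ((3:Int) == (n:Int)) = false := by simp; omega
      have e4 : ((4:Int) == (n:Int)) = false := by simp; omega
      have e5 : ((5:Int) == (n:Int)) = false := by simp; omega
      have e6 : ((6:Int) == (n:Int)) = false := by simp; omega
      rw [e3, e4, e5, e6]
      rfl
    rw [this]
    have h3 : n ≠ 3 := by omega
    have h4 : n ≠ 4 := by omega
    have h5 : n ≠ 5 := by omega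
    have h6 : n ≠ 6 := by omega
    simp [h3, h4, h5, h6]

-- one guess contributes the same amount on both sides
theorem pvStep_eq (point : Int) (g : String) (word : String) :
    (let c := pvAInner g.toList word.toList 0
     if c = 3 then point + 1
     else if c = 4 then point + 2
     else if c = 5 then point + 3
     else if c = 6 then point + 54
     else point) =
    (if pvBCheck g.toList word.toList then
       point + PySem.Dict.getD pvPts ((g.toList.length : Int)) 0
     else point) := by
  simp only [pvAInner_eq]
  cases h : pvBCheck g.toList word.toList
  · simp
  · simp only [Nat.zero_add, pvPts_getD]
    split_ifs <;> simp_all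

theorem pvFold_eq (guesses : List String) (word : String) : ∀ point : Int,
    guesses.foldl (fun point guess =>
      let c := pvAInner guess.toList word.toList 0
      if c = 3 then point + 1
      else if c = 4 then point + 2
      else if c = 5 then point + 3
      else if c = 6 then point + 54
      else point) point =
    guesses.foldl (fun total g =>
      let gl := g.toList
      if pvBCheck gl word.toList then total + PySem.Dict.getD pvPts ((gl.length : Int)) 0
      else total) point := by
  induction guesses with
  | nil => intro point; rfl
  | cons g gs ih =>
    intro point
    simp only [List.foldl_cons]
    rw [pvStep_eq point g word]
    exact ih _

-- ===== VERDICT (by name: the statement is the Claim_ definition above) =====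
theorem total_points_spec : Claim_equal_total_points := by
  intro guesses word _
  unfold Spec_total_points total_points total_points_alt
  exact pvFold_eq guesses word 0
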